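-- pv_equiv track=rewrite | github.com/SuperbHardik12/equations-solver | main.py | find_coefficientsl
-- ===== SOURCE A (Python) =====
-- def find_coefficientsl(a, variable):
--     a = brackets_check(a)
--     left = a.split('=')[0] + '='
--     right = a.split('=')[1] + '='
--     summ1, summ2, summ3 = 0, 0, 0
--     for j in range(len(left)):
--         t1, t2, t3 = "", "", ""
--         if left[j] == variable:
--             temp = j - 1
--             for k in range(j - 1, -1, -1):
--                 if not left[k].isdigit() and left[k] != '.':
--                     temp = k
--                     break
--                 t2 += left[k]
--             if left[temp] == '-':
--                 summ2 -= int(t2[::-1]) if t2 else 1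
--             else:
--                 summ2 += int(t2[::-1]) if t2 else 1
--     for j in range(len(right)):
--         t1, t2, t3 = "", "", ""
--         if right[j] == variable:
--             temp = j - 1
--             for k in range(j - 1, -1, -1):
--                 if not right[k].isdigit() and right[k] != '.':
--                     temp = k
--                     break
--                 t2 += right[k]
--             if right[temp] == '-':
--                 summ2 += int(t2[::-1]) if t2 else 1
--             else:
--                 summ2 -= int(t2[::-1]) if t2 else 1
--     return summ2
--
-- def brackets_check(a):
--     a = '+' + a + '+'
--     b = ""
--     i = 0
--     while i < len(a):
--         if a[i] == '-' and a[i + 1] == '(':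
--             b = b + '-'
--             j = i
--             while a[j] != ')':
--                 j = j + 1
--             temp = j
--             for k in range(i + 1, temp + 1):
--                 if a[k] == '+':
--                     b += '-'
--                 elif a[k] == '-':
--                     b += '+'
--                 else:
--                     b += a[k]
--             i = temp
--         else:
--             b += a[i]
--         i = i + 1
--     a = b
--     a = a.replace('(', '')
--     a = a.replace(')', '')
--     return a
-- ===== SOURCE B (Python) =====
-- def brackets_check(a):
--     a = '+' + a + '+'
--     b = ""
--     i = 0
--     while i < len(a):
--         if a[i] == '-' and a[i + 1] == '(':
--             b = b + '-'
--             j = i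
--             while a[j] != ')':
--                 j = j + 1
--             temp = j
--             for k in range(i + 1, temp + 1):
--                 if a[k] == '+':
--                     b += '-'
--                 elif a[k] == '-':
--                     b += '+'
--                 else:
--                     b += a[k]
--             i = temp
--         else:
--             b += a[i]
--         i = i + 1
--     a = b
--     a = a.replace('(', '')
--     a = a.replace(')', '')
--     return a
--
--
-- def _side_sum(side, variable):
--     # one forward pass: run = pending digit/dot run, prev = last non-run char seen ('' = none)
--     total = 0
--     run = ""
--     prev = ""
--     for c in side:
--         if c == variable:
--             coeff = int(run) if run else 1
--             total += -coeff if prev == '-' else coeff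
--         if c.isdigit() or c == '.':
--             run += c
--         else:
--             run = ""
--             prev = c
--     return total
--
--
-- def find_coefficientsl(a, variable):
--     a = brackets_check(a)
--     parts = a.split('=')
--     return _side_sum(parts[0] + '=', variable) - _side_sum(parts[1] + '=', variable)
-- ===== Notes on version B (the rewrite author's own statement) =====
-- stated objective: alternative
-- what changed: A re-scans backwards over the digits before every variable occurrence (and splits the string twice); B makes a single forward pass per side carrying the pending digit run and the last sign character, so the inner backward scan disappears.
-- outside the precondition, e.g. on find_coefficientsl('.--(1)1=', '+'): A returns 0, B returns 0
import Mathlib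
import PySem

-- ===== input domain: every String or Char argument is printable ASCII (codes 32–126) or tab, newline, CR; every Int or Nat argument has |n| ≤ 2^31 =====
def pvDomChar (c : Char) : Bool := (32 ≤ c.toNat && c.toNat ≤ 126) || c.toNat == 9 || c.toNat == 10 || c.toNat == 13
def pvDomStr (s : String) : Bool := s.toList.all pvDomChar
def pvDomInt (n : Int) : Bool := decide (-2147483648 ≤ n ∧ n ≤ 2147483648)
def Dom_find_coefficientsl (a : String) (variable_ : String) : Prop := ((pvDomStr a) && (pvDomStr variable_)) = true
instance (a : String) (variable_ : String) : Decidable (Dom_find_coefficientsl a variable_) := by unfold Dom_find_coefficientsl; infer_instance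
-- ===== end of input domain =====

-- B replaces A's per-occurrence backward coefficient scans by a single forward pass per side
-- carrying the pending digit run and the last sign character (objective: alternative).

-- ===== PORT A =====
-- brackets_check is an unchanged helper shared verbatim by both Pythons, so both ports share it.
def pvFindClose (s : List Char) (j : Nat) : Nat → Option Nat
  | 0 => none
  | fuel + 1 =>
    match s[j]? with
    | none => none                               -- Python: IndexError in `while a[j] != ')'`
    | some c => if c = ')' then some j else pvFindClose s (j + 1) fuel

def pvBCLoop (s : List Char) (i : Nat) (b : List Char) : Nat → Option (List Char)
  | 0 => none                                    -- fuel exhausted (never happens: i strictly increases)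
  | fuel + 1 =>
    match s[i]? with
    | none => some b                             -- `while i < len(a)` fails: loop exit
    | some ci =>
      if ci = '-' then
        match s[(i + 1 : Nat)]? with
        | none => none                           -- Python: IndexError on a[i+1]
        | some c2 =>
          if c2 = '(' then
            match pvFindClose s i (s.length + 1) with
            | none => none
            | some temp =>
              -- for k in range(i+1, temp+1): append flipped a[k]
              let seg := (((s.drop (i + 1)).take (temp - i)).map
                (fun c => if c = '+' then '-' else if c = '-' then '+' else c))
              pvBCLoop s (temp + 1) (b ++ ['-'] ++ seg) fuel
          else pvBCLoop s (i + 1) (b ++ [ci]) fuel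
      else pvBCLoop s (i + 1) (b ++ [ci]) fuel

def pvBracketsCheck (a : List Char) : Option (List Char) :=
  let s := '+' :: a ++ ['+']
  (pvBCLoop s 0 [] (s.length + 2)).map
    (fun b => PySem.Chars.replace (PySem.Chars.replace b ['('] []) [')'] [])

-- inner `for k in range(j-1, -1, -1)` scan of A: returns (t2, temp)
def pvAScan (side : List Char) (jm1 : Int) : Nat → List Char → (List Char × Int)
  | 0, t2 => (t2, jm1)
  | k + 1, t2 =>
    let c := side.getD k ' '
    if ¬ (PySem.Chars.isdigit c = true) ∧ c ≠ '.' then (t2, (k : Int))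
    else pvAScan side jm1 k (t2 ++ [c])

-- one step of A's left loop (none = Python raised: IndexError/ValueError; excluded by Pre_)
def pvAStepL (side : List Char) (v : List Char) (acc : Option Int) (j : Nat) : Option Int :=
  match acc with
  | none => none
  | some summ2 =>
    if [side.getD j ' '] = v then
      let r := pvAScan side ((j : Int) - 1) j []
      match PySem.List.pyGet? side r.2 with
      | none => none
      | some sc =>
        match (if r.1 = [] then some (1 : Int) else PySem.Int.ofChars? r.1.reverse) with
        | none => none
        | some coeff => some (if sc = '-' then summ2 - coeff else summ2 + coeff)
    else some summ2

-- one step of A's right loop (signs flipped, as in the Python)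
def pvAStepR (side : List Char) (v : List Char) (acc : Option Int) (j : Nat) : Option Int :=
  match acc with
  | none => none
  | some summ2 =>
    if [side.getD j ' '] = v then
      let r := pvAScan side ((j : Int) - 1) j []
      match PySem.List.pyGet? side r.2 with
      | none => none
      | some sc =>
        match (if r.1 = [] then some (1 : Int) else PySem.Int.ofChars? r.1.reverse) with
        | none => none
        | some coeff => some (if sc = '-' then summ2 + coeff else summ2 - coeff)
    else some summ2

def find_coefficientsl (a : String) (variable_ : String) : Int :=
  match pvBracketsCheck a.toList with
  | none => 0                                    -- Python raised inside brackets_check (outside Pre_)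
  | some c =>
    let parts := PySem.Chars.splitOn c ['=']
    match parts[1]? with
    | none => 0                                  -- IndexError: no '=' (outside Pre_)
    | some p1 =>
      let left := parts.getD 0 [] ++ ['=']
      let right := p1 ++ ['=']
      let v := variable_.toList
      (((List.range left.length).foldl (pvAStepL left v) (some 0)).bind
        (fun s => (List.range right.length).foldl (pvAStepR right v) (some s))).getD 0

-- ===== PORT B =====
-- forward pass state: (total, pending digit/dot run, last non-run char as 1-char string)
def pvBStep (v : List Char) (acc : Option (Int × List Char × List Char)) (c : Char) :
    Option (Int × List Char × List Char) :=
  match acc with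
  | none => none
  | some (total, run, prev) =>
    match (if [c] = v then
             match (if run = [] then some (1 : Int) else PySem.Int.ofChars? run) with
             | none => none                      -- Python: int(run) raised ValueError (outside Pre_)
             | some coeff => some (if prev = ['-'] then total - coeff else total + coeff)
           else some total) with
    | none => none
    | some total' =>
      if PySem.Chars.isdigit c || c = '.' then some (total', run ++ [c], prev)
      else some (total', [], [c])

def pvBSide (side : List Char) (v : List Char) : Option Int :=
  (side.foldl (pvBStep v) (some (0, [], []))).map (fun st => st.1)

def find_coefficientsl_alt (a : String) (variable_ : String) : Int :=
  match pvBracketsCheck a.toList with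
  | none => 0
  | some c =>
    let parts := PySem.Chars.splitOn c ['=']
    match parts[1]? with
    | none => 0
    | some p1 =>
      let v := variable_.toList
      (match pvBSide (parts.getD 0 [] ++ ['=']) v, pvBSide (p1 ++ ['=']) v with
       | some l, some r => some (l - r)
       | _, _ => none).getD 0

-- ===== PRECONDITION & SPEC =====
-- helpers for Pre_ (conditions on the raw input string only; they use neither port)
-- every "-(" in a is followed by a later ')' (otherwise brackets_check's inner while raises IndexError)
def pvClosedOK (l : List Char) : Bool :=
  (List.range l.length).all fun i =>
    !(l[i]? == some '-' && l[(i + 1 : Nat)]? == some '(') ||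
      ((List.range l.length).any fun j => decide (i < j) && l[j]? == some ')')

-- the part of the paren-stripped string A's two loops actually scan: up to (and including) the second '='
def pvRegion (s : List Char) : List Char :=
  match PySem.Chars.splitOn s ['='] with
  | p0 :: p1 :: rest => p0 ++ '=' :: (p1 ++ if rest.isEmpty then [] else ['='])
  | _ => s

-- no '.' in the pending digit/dot run at any position matched by m
def pvDotScan (m : Char → Bool) : List Char → List Char → Bool
  | _, [] => true
  | run, c :: rest =>
      (!(m c) || run.all (fun d => !(d == '.'))) &&
      pvDotScan m (if PySem.Chars.isdigit c || c == '.' then run ++ [c] else []) rest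

def pvDotOK (a : String) (variable_ : String) : Bool :=
  let s := ('+' :: a.toList ++ ['+']).filter (fun c => !(c == '(' || c == ')'))
  let m : Char → Bool :=
    if (variable_ = "+" ∨ variable_ = "-") ∧ PySem.Str.isIn "-(" a = true
    then (fun c => c == '+' || c == '-')      -- sign flips may move these occurrences: check both signs
    else (fun c => decide ([c] = variable_.toList))
  pvDotScan m [] (pvRegion s)

-- Pre_ excludes exactly the inputs where the Python A raises: no '=' (IndexError on split[1]),
-- an unclosed '-(' (IndexError in brackets_check), or a '.' inside the digit run immediately before
-- a scanned variable occurrence (ValueError in int); only when variable is '+'/'-' AND a contains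
-- '-(' is the dot check conservative (it covers both sign characters) — see the cited example,
-- where A and B agree anyway.
def Pre_find_coefficientsl (a : String) (variable_ : String) : Prop :=
  PySem.Str.isIn "=" a = true ∧ pvClosedOK a.toList = true ∧ pvDotOK a variable_ = true
instance (a : String) (variable_ : String) : Decidable (Pre_find_coefficientsl a variable_) := by
  unfold Pre_find_coefficientsl; infer_instance

def pvWitness_find_coefficientsl : String × String := ("2x+3=x", "x")

def Spec_find_coefficientsl (a : String) (variable_ : String) (out : Int) : Prop := out = find_coefficientsl_alt a variable_
instance (a : String) (variable_ : String) (out : Int) : Decidable (Spec_find_coefficientsl a variable_ out) := by unfold Spec_find_coefficientsl; infer_instance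

-- ===== CLAIM (what is proved, stated in full; the proofs are below) =====
def Claim_equal_find_coefficientsl : Prop := ∀ (a : String) (variable_ : String), Dom_find_coefficientsl a variable_ → Pre_find_coefficientsl a variable_ → Spec_find_coefficientsl a variable_ (find_coefficientsl a variable_)

-- ===== LEMMAS AND PROOFS =====
-- (we prove the stronger, unconditional statement: the two ports agree on every input)

def pvIsCoef (c : Char) : Bool := PySem.Chars.isdigit c || c = '.'

-- the maximal digit/dot suffix of a list, and the character just before it (B's run/prev)
def pvDsuf (l : List Char) : List Char := (l.reverse.takeWhile pvIsCoef).reverse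

def pvPchar (l : List Char) : List Char :=
  if pvDsuf l = l then [] else [l.getD (l.length - (pvDsuf l).length - 1) ' ']

theorem pvDsuf_suffix (l : List Char) : pvDsuf l <:+ l := by
  have h := List.takeWhile_prefix (l := l.reverse) (p := pvIsCoef)
  rw [← List.reverse_suffix] at h
  simpa [pvDsuf] using h

theorem pvDsuf_len_le (l : List Char) : (pvDsuf l).length ≤ l.length :=
  (pvDsuf_suffix l).sublist.length_le

theorem pvDsuf_lt_of_ne {l : List Char} (h : pvDsuf l ≠ l) : (pvDsuf l).length < l.length := by
  rcases Nat.lt_or_ge (pvDsuf l).length l.length with h1 | h1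
  · exact h1
  · exact absurd ((pvDsuf_suffix l).sublist.eq_of_length (le_antisymm (pvDsuf_len_le l) h1)) h

theorem pvDsuf_append_coef (l : List Char) {c : Char} (h : pvIsCoef c = true) :
    pvDsuf (l ++ [c]) = pvDsuf l ++ [c] := by
  simp [pvDsuf, h]

theorem pvDsuf_append_not (l : List Char) {c : Char} (h : ¬ pvIsCoef c = true) :
    pvDsuf (l ++ [c]) = [] := by
  simp [pvDsuf, h]

theorem pvPchar_append_coef (l : List Char) {c : Char} (h : pvIsCoef c = true) :
    pvPchar (l ++ [c]) = pvPchar l := by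
  unfold pvPchar
  rw [pvDsuf_append_coef l h]
  by_cases he : pvDsuf l = l
  · simp [he]
  · have hne : ¬ (pvDsuf l ++ [c] = l ++ [c]) := by simpa using he
    have hlt := pvDsuf_lt_of_ne he
    simp only [he, hne, if_false]
    have hidx : l.length + 1 - ((pvDsuf l).length + 1) - 1 = l.length - (pvDsuf l).length - 1 := by omega
    have hlt2 : l.length - (pvDsuf l).length - 1 < l.length := by omega
    simp [List.getD, List.getElem?_append_left hlt2]

theorem pvPchar_append_not (l : List Char) {c : Char} (h : ¬ pvIsCoef c = true) :
    pvPchar (l ++ [c]) = [c] := by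
  unfold pvPchar
  rw [pvDsuf_append_not l h]
  have hne : ¬ (([] : List Char) = l ++ [c]) := by simp
  simp [hne, List.getD]

theorem pvB_shape (v : List Char) (l : List Char) :
    l.foldl (pvBStep v) (some (0, [], [])) = none ∨
    ∃ T, l.foldl (pvBStep v) (some (0, [], [])) = some (T, pvDsuf l, pvPchar l) := by
  induction l using List.reverseRecOn with
  | nil => right; exact ⟨0, by simp [pvDsuf, pvPchar]⟩
  | append_singleton l c ih =>
    rw [List.foldl_append]
    rcases ih with h | ⟨T, h⟩
    · left; simp [h, pvBStep]
    · rw [h]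
      by_cases hc : pvIsCoef c = true
      · have hc' : (PySem.Chars.isdigit c || c = '.') = true := by simpa [pvIsCoef] using hc
        simp only [pvBStep, List.foldl_cons, List.foldl_nil]
        cases htot : (if [c] = v then
             match (if pvDsuf l = [] then some (1 : Int) else PySem.Int.ofChars? (pvDsuf l)) with
             | none => none
             | some coeff => some (if pvPchar l = ['-'] then T - coeff else T + coeff)
           else some T) with
        | none => left; simp
        | some t' =>
          right; refine ⟨t', ?_⟩
          simp [hc', pvDsuf_append_coef l hc, pvPchar_append_coef l hc]
      · have hc' : (PySem.Chars.isdigit c || c = '.') = false := by simpa [pvIsCoef] using hc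
        simp only [pvBStep, List.foldl_cons, List.foldl_nil]
        cases htot : (if [c] = v then
             match (if pvDsuf l = [] then some (1 : Int) else PySem.Int.ofChars? (pvDsuf l)) with
             | none => none
             | some coeff => some (if pvPchar l = ['-'] then T - coeff else T + coeff)
           else some T) with
        | none => left; simp
        | some t' =>
          right; refine ⟨t', ?_⟩
          simp [hc', pvDsuf_append_not l hc, pvPchar_append_not l hc]

theorem pvAScan_eq (side : List Char) (jm1 : Int) :
    ∀ m, m ≤ side.length → ∀ t2, pvAScan side jm1 m t2 =
      (t2 ++ (pvDsuf (side.take m)).reverse,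
       if (pvDsuf (side.take m)).length = m then jm1
       else ((m - (pvDsuf (side.take m)).length - 1 : Nat) : Int)) := by
  intro m
  induction m with
  | zero => intro _ t2; simp [pvAScan, pvDsuf]
  | succ k ih =>
    intro hm t2
    have hk : k < side.length := by omega
    have htake : side.take (k + 1) = side.take k ++ [side[k]] := by
      rw [List.take_add_one]; simp [List.getElem?_eq_getElem hk]
    have hgetD : side.getD k ' ' = side[k] := by
      simp [List.getD, List.getElem?_eq_getElem hk]
    have hlen : (pvDsuf (side.take k)).length ≤ k := by
      have := pvDsuf_len_le (side.take k)
      simpa [List.length_take, Nat.min_eq_left (le_of_lt hk)] using this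
    by_cases hc : pvIsCoef (side[k]) = true
    · have hcond : ¬ (¬ (PySem.Chars.isdigit (side.getD k ' ') = true) ∧ side.getD k ' ' ≠ '.') := by
        rw [hgetD]
        simp only [pvIsCoef, Bool.or_eq_true] at hc
        rcases hc with h | h
        · simp [h]
        · simp at h; simp [h]
      rw [pvAScan]

      rw [if_neg hcond]
      rw [ih (by omega) (t2 ++ [side.getD k ' '])]
      rw [htake, pvDsuf_append_coef _ hc, hgetD]
      rw [Prod.mk.injEq]
      refine ⟨by simp, ?_⟩
      by_cases he : (pvDsuf (side.take k)).length = k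
      · simp [he]
      · have h1 : ¬ ((pvDsuf (side.take k) ++ [side[k]]).length = k + 1) := by simp [he]
        rw [if_neg h1, if_neg he]
        congr 1
        simp only [List.length_append, List.length_cons, List.length_nil]
        omega
    · have hcond : (¬ (PySem.Chars.isdigit (side.getD k ' ') = true) ∧ side.getD k ' ' ≠ '.') := by
        rw [hgetD]
        simp only [pvIsCoef, Bool.or_eq_true, not_or] at hc
        push_neg at hc
        constructor
        · simp [hc.1]
        · intro h; exact absurd (by simp [h]) hc.2
      rw [pvAScan]

      rw [if_pos hcond]
      rw [htake, pvDsuf_append_not _ hc]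
      have h1 : ¬ (([] : List Char).length = k + 1) := by simp
      rw [if_neg h1]
      simp

theorem pvDsuf_mem {l : List Char} {c : Char} (h : c ∈ pvDsuf l) : pvIsCoef c = true := by
  simp only [pvDsuf, List.mem_reverse] at h
  exact List.mem_takeWhile_imp h

theorem pvStepL_eq (side v : List Char) (hne : side ≠ []) (hl : side.getLast hne ≠ '-')
    {m : Nat} (hm : m < side.length) (T init : Int) :
    pvAStepL side v (some init) m =
      (pvBStep v (some (T, pvDsuf (side.take m), pvPchar (side.take m))) (side.getD m ' ')).map
        (fun st => (init - T) + st.1) := by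
  have hlen_take : (side.take m).length = m := by
    simp [List.length_take]; omega
  simp only [pvAStepL, pvBStep]
  by_cases hv : [side.getD m ' '] = v
  · rw [if_pos hv, if_pos hv]
    rw [pvAScan_eq side ((m : Int) - 1) m (le_of_lt hm) []]
    simp only [List.nil_append]
    by_cases hrm : (pvDsuf (side.take m)).length = m
    · rw [if_pos hrm]
      have hreq : pvDsuf (side.take m) = side.take m :=
        (pvDsuf_suffix (side.take m)).sublist.eq_of_length (by rw [hlen_take, hrm])
      have hp : pvPchar (side.take m) = [] := by rw [pvPchar, if_pos hreq]
      rcases Nat.eq_zero_or_pos m with hm0 | hm0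
      · subst hm0
        have hr0 : pvDsuf (side.take 0) = [] := by simp [pvDsuf]
        have hc1 : ((0 : Nat) : Int) - 1 = -1 := by omega
        rw [hc1, PySem.List.pyGet?_neg_one, List.getLast?_eq_getLast hne, hr0, hp]
        cases hd : (PySem.Chars.isdigit (side.getD 0 ' ') || side.getD 0 ' ' = '.') <;>
          simp [hd, hl] <;> omega
      · have hcast : ((m : Nat) : Int) - 1 = ((m - 1 : Nat) : Int) := by omega
        rw [hcast, PySem.List.pyGet?_natCast]
        have hm1 : m - 1 < side.length := by omega
        rw [List.getElem?_eq_getElem hm1, hp]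
        have hmem : side[m - 1] ∈ pvDsuf (side.take m) := by
          rw [hreq]
          have hgt : (side.take m)[m - 1]'(by omega) = side[m - 1] := List.getElem_take
          rw [← hgt]
          exact List.getElem_mem _
        have hcoefc := pvDsuf_mem hmem
        have hscne : side[m - 1] ≠ '-' := by
          intro h; rw [h] at hcoefc; exact absurd hcoefc (by decide)
        have hrne : pvDsuf (side.take m) ≠ [] := by
          intro h; rw [h] at hrm; simp at hrm; omega
        simp only [List.reverse_reverse]
        cases hof : PySem.Int.ofChars? (pvDsuf (side.take m)) <;>
          cases hd : (PySem.Chars.isdigit (side.getD m ' ') || side.getD m ' ' = '.') <;>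
          simp [hof, hd, hrne, hscne] <;> omega
    · rw [if_neg hrm]
      have hrlt : (pvDsuf (side.take m)).length < m := by
        have := pvDsuf_len_le (side.take m); rw [hlen_take] at this; omega
      set idx := m - (pvDsuf (side.take m)).length - 1 with hidx
      have hidxm : idx < m := by omega
      rw [PySem.List.pyGet?_natCast]
      rw [List.getElem?_eq_getElem (by omega : idx < side.length)]
      have hne2 : pvDsuf (side.take m) ≠ side.take m := by
        intro h
        have := congrArg List.length h; rw [hlen_take] at this; omega
      have hp : pvPchar (side.take m) = [side[idx]] := by
        rw [pvPchar, if_neg hne2, hlen_take]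
        have hgd : (side.take m).getD idx ' ' = side[idx] := by
          rw [List.getD_eq_getElem?_getD, List.getElem?_take_of_lt hidxm,
            List.getElem?_eq_getElem (by omega : idx < side.length)]
          rfl
        rw [hgd]
      rw [hp]
      by_cases hr0 : pvDsuf (side.take m) = []
      · cases hd : (PySem.Chars.isdigit (side.getD m ' ') || side.getD m ' ' = '.') <;>
          by_cases hsc : side[idx] = '-' <;> simp [hd, hsc, hr0] <;> omega
      · simp only [List.reverse_reverse]
        cases hof : PySem.Int.ofChars? (pvDsuf (side.take m)) <;>
          cases hd : (PySem.Chars.isdigit (side.getD m ' ') || side.getD m ' ' = '.') <;>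
          by_cases hsc : side[idx] = '-' <;> simp [hof, hd, hsc, hr0] <;> omega
  · rw [if_neg hv, if_neg hv]
    cases hd : (PySem.Chars.isdigit (side.getD m ' ') || side.getD m ' ' = '.') <;>
      simp [hd] <;> omega

theorem pvStepR_eq (side v : List Char) (hne : side ≠ []) (hl : side.getLast hne ≠ '-')
    {m : Nat} (hm : m < side.length) (T init : Int) :
    pvAStepR side v (some init) m =
      (pvBStep v (some (T, pvDsuf (side.take m), pvPchar (side.take m))) (side.getD m ' ')).map
        (fun st => (init + T) - st.1) := by
  have hlen_take : (side.take m).length = m := by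
    simp [List.length_take]; omega
  simp only [pvAStepR, pvBStep]
  by_cases hv : [side.getD m ' '] = v
  · rw [if_pos hv, if_pos hv]
    rw [pvAScan_eq side ((m : Int) - 1) m (le_of_lt hm) []]
    simp only [List.nil_append]
    by_cases hrm : (pvDsuf (side.take m)).length = m
    · rw [if_pos hrm]
      have hreq : pvDsuf (side.take m) = side.take m :=
        (pvDsuf_suffix (side.take m)).sublist.eq_of_length (by rw [hlen_take, hrm])
      have hp : pvPchar (side.take m) = [] := by rw [pvPchar, if_pos hreq]
      rcases Nat.eq_zero_or_pos m with hm0 | hm0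
      · subst hm0
        have hr0 : pvDsuf (side.take 0) = [] := by simp [pvDsuf]
        have hc1 : ((0 : Nat) : Int) - 1 = -1 := by omega
        rw [hc1, PySem.List.pyGet?_neg_one, List.getLast?_eq_getLast hne, hr0, hp]
        cases hd : (PySem.Chars.isdigit (side.getD 0 ' ') || side.getD 0 ' ' = '.') <;>
          simp [hd, hl] <;> omega
      · have hcast : ((m : Nat) : Int) - 1 = ((m - 1 : Nat) : Int) := by omega
        rw [hcast, PySem.List.pyGet?_natCast]
        have hm1 : m - 1 < side.length := by omega
        rw [List.getElem?_eq_getElem hm1, hp]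
        have hmem : side[m - 1] ∈ pvDsuf (side.take m) := by
          rw [hreq]
          have hgt : (side.take m)[m - 1]'(by omega) = side[m - 1] := List.getElem_take
          rw [← hgt]
          exact List.getElem_mem _
        have hcoefc := pvDsuf_mem hmem
        have hscne : side[m - 1] ≠ '-' := by
          intro h; rw [h] at hcoefc; exact absurd hcoefc (by decide)
        have hrne : pvDsuf (side.take m) ≠ [] := by
          intro h; rw [h] at hrm; simp at hrm; omega
        simp only [List.reverse_reverse]
        cases hof : PySem.Int.ofChars? (pvDsuf (side.take m)) <;>
          cases hd : (PySem.Chars.isdigit (side.getD m ' ') || side.getD m ' ' = '.') <;>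
          simp [hof, hd, hrne, hscne] <;> omega
    · rw [if_neg hrm]
      have hrlt : (pvDsuf (side.take m)).length < m := by
        have := pvDsuf_len_le (side.take m); rw [hlen_take] at this; omega
      set idx := m - (pvDsuf (side.take m)).length - 1 with hidx
      have hidxm : idx < m := by omega
      rw [PySem.List.pyGet?_natCast]
      rw [List.getElem?_eq_getElem (by omega : idx < side.length)]
      have hne2 : pvDsuf (side.take m) ≠ side.take m := by
        intro h
        have := congrArg List.length h; rw [hlen_take] at this; omega
      have hp : pvPchar (side.take m) = [side[idx]] := by
        rw [pvPchar, if_neg hne2, hlen_take]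
        have hgd : (side.take m).getD idx ' ' = side[idx] := by
          rw [List.getD_eq_getElem?_getD, List.getElem?_take_of_lt hidxm,
            List.getElem?_eq_getElem (by omega : idx < side.length)]
          rfl
        rw [hgd]
      rw [hp]
      by_cases hr0 : pvDsuf (side.take m) = []
      · cases hd : (PySem.Chars.isdigit (side.getD m ' ') || side.getD m ' ' = '.') <;>
          by_cases hsc : side[idx] = '-' <;> simp [hd, hsc, hr0] <;> omega
      · simp only [List.reverse_reverse]
        cases hof : PySem.Int.ofChars? (pvDsuf (side.take m)) <;>
          cases hd : (PySem.Chars.isdigit (side.getD m ' ') || side.getD m ' ' = '.') <;>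
          by_cases hsc : side[idx] = '-' <;> simp [hof, hd, hsc, hr0] <;> omega
  · rw [if_neg hv, if_neg hv]
    cases hd : (PySem.Chars.isdigit (side.getD m ' ') || side.getD m ' ' = '.') <;>
      simp [hd] <;> omega

theorem pvFoldL_eq (side v : List Char) (hne : side ≠ []) (hl : side.getLast hne ≠ '-') :
    ∀ m, m ≤ side.length → ∀ init,
      (List.range m).foldl (pvAStepL side v) (some init) =
        ((side.take m).foldl (pvBStep v) (some (0, [], []))).map (fun st => init + st.1) := by
  intro m
  induction m with
  | zero => intro _ init; simp
  | succ k ih =>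
    intro hm init
    have hk : k < side.length := by omega
    have htake : side.take (k + 1) = side.take k ++ [side[k]] := by
      rw [List.take_add_one]; simp [List.getElem?_eq_getElem hk]
    have hgetD : side.getD k ' ' = side[k] := by
      simp [List.getD, List.getElem?_eq_getElem hk]
    rw [List.range_succ, List.foldl_append, htake, List.foldl_append]
    rw [ih (by omega) init]
    rcases pvB_shape v (side.take k) with hB | ⟨T, hB⟩
    · rw [hB]
      simp [pvAStepL, pvBStep]
    · rw [hB]
      simp only [Option.map_some]
      have hstep := pvStepL_eq side v hne hl hk T (init + T)
      rw [hgetD] at hstep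
      simp only [List.foldl_cons, List.foldl_nil]
      rw [hstep]
      have hfun : (fun (st : Int × List Char × List Char) => (init + T - T) + st.1) =
          (fun st => init + st.1) := by funext st; omega
      rw [hfun]

theorem pvFoldR_eq (side v : List Char) (hne : side ≠ []) (hl : side.getLast hne ≠ '-') :
    ∀ m, m ≤ side.length → ∀ init,
      (List.range m).foldl (pvAStepR side v) (some init) =
        ((side.take m).foldl (pvBStep v) (some (0, [], []))).map (fun st => init - st.1) := by
  intro m
  induction m with
  | zero => intro _ init; simp
  | succ k ih =>
    intro hm init
    have hk : k < side.length := by omega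
    have htake : side.take (k + 1) = side.take k ++ [side[k]] := by
      rw [List.take_add_one]; simp [List.getElem?_eq_getElem hk]
    have hgetD : side.getD k ' ' = side[k] := by
      simp [List.getD, List.getElem?_eq_getElem hk]
    rw [List.range_succ, List.foldl_append, htake, List.foldl_append]
    rw [ih (by omega) init]
    rcases pvB_shape v (side.take k) with hB | ⟨T, hB⟩
    · rw [hB]
      simp [pvAStepR, pvBStep]
    · rw [hB]
      simp only [Option.map_some]
      have hstep := pvStepR_eq side v hne hl hk T (init - T)
      rw [hgetD] at hstep
      simp only [List.foldl_cons, List.foldl_nil]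
      rw [hstep]
      have hfun : (fun (st : Int × List Char × List Char) => (init - T + T) - st.1) =
          (fun st => init - st.1) := by funext st; omega
      rw [hfun]

-- top-level agreement on the two sides
theorem pv_sides_eq (l0 p1 v : List Char) :
    ((((List.range (l0 ++ ['=']).length).foldl (pvAStepL (l0 ++ ['=']) v) (some 0)).bind
        (fun s => (List.range (p1 ++ ['=']).length).foldl (pvAStepR (p1 ++ ['=']) v) (some s))).getD 0)
      = ((match (((l0 ++ ['=']).foldl (pvBStep v) (some (0, [], []))).map
                   (fun (st : Int × List Char × List Char) => st.1)),
                 (((p1 ++ ['=']).foldl (pvBStep v) (some (0, [], []))).map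
                   (fun (st : Int × List Char × List Char) => st.1)) with
          | some l, some r => some (l - r)
          | _, _ => none).getD 0) := by
  have hneL : l0 ++ ['='] ≠ [] := by simp
  have hneR : p1 ++ ['='] ≠ [] := by simp
  have hlL : (l0 ++ ['=']).getLast hneL ≠ '-' := by simp
  have hlR : (p1 ++ ['=']).getLast hneR ≠ '-' := by simp
  rw [pvFoldL_eq _ v hneL hlL _ le_rfl 0]
  rw [List.take_length]
  cases hB1 : (l0 ++ ['=']).foldl (pvBStep v) (some (0, [], [])) with
  | none => simp
  | some st1 =>
    simp only [Option.map_some, Option.bind_some]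
    rw [pvFoldR_eq _ v hneR hlR _ le_rfl (0 + st1.1)]
    rw [List.take_length]
    cases hB2 : (p1 ++ ['=']).foldl (pvBStep v) (some (0, [], [])) with
    | none => simp
    | some st2 =>
      simp only [Option.map_some]
      simp

-- ===== VERDICT (by name: the statement is the Claim_ definition above) =====
theorem find_coefficientsl_spec : Claim_equal_find_coefficientsl := by
  intro a variable_ _ _
  unfold Spec_find_coefficientsl find_coefficientsl find_coefficientsl_alt
  cases hbc : pvBracketsCheck a.toList with
  | none => rfl
  | some c =>
    simp only []
    cases hp : (PySem.Chars.splitOn c ['='])[1]? with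
    | none => rfl
    | some p1 =>
      simp only [pvBSide]
      exact pv_sides_eq ((PySem.Chars.splitOn c ['=']).getD 0 []) p1 variable_.toList
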